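-- pv_equiv track=rewrite | github.com/landonprince/Slots | graph.py | get_largest_component
-- ===== SOURCE A (Python) =====
-- def get_component_shapes(lines, components):
--     component_shape_sets = {}
--
--     for i, component in enumerate(components):
--         # gather all shapes from all lines in the component
--         component_shapes = set()
--         for line_index in component:
--             component_shapes.update(lines[line_index]["shapes"])
--         component_shape_sets[i] = component_shapes
--
--     return component_shape_sets
--
-- def get_largest_component(lines, components):
--     # build dictionary of shapes in each component
--     component_shape_sets = get_component_shapes(lines, components)
--
--     # find component with max number of shapes
--     max_component_index = None
--     max_num_shapes = -1
--     for index, shape_set in component_shape_sets.items():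
--         if len(shape_set) > max_num_shapes:
--             max_num_shapes = len(shape_set)
--             max_component_index = index
--
--     # return the largest component's set of line indices
--     if max_component_index is not None:
--         return components[max_component_index]
--     else:
--         return None # empty if no components
-- ===== SOURCE B (Python) =====
-- def get_largest_component(lines, components):
--     # No dict of shape sets and no hash sets at all: for each component the
--     # number of distinct shapes is found by sorting its shapes and counting
--     # run boundaries in one scan; a running best (strict >, sentinel -1)
--     # keeps the first component with the most distinct shapes.
--     best = None
--     best_n = -1
--     for comp in components:
--         shapes = sorted(s for li in comp for s in lines[li]["shapes"])
--         n = 0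
--         prev = None
--         for s in shapes:
--             if s != prev:
--                 n += 1
--             prev = s
--         if n > best_n:
--             best_n = n
--             best = comp
--     return best
-- ===== Notes on version B (the rewrite author's own statement) =====
-- stated objective: alternative
-- what changed: Replaces A's hash-set unions stored in an index-keyed dict plus a dict-items argmax loop and final components[i] lookup by a single pass that, per component, sorts the component's shape list and counts run boundaries in one scan (sort-then-scan distinct counting, no sets and no dict), keeping the first best component directly.
import Mathlib
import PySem

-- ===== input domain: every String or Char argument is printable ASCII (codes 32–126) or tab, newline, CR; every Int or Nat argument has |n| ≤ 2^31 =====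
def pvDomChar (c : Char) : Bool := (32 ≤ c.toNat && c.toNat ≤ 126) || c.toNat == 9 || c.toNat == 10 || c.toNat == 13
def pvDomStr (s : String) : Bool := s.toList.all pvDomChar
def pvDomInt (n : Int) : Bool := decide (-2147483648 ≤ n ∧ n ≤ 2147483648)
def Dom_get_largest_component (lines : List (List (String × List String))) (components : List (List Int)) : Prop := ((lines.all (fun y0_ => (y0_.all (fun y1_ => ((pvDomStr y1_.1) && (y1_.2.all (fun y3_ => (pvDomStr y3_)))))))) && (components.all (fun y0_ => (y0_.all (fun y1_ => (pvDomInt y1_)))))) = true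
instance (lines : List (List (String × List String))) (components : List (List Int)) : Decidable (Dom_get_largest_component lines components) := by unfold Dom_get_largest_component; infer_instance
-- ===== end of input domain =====

-- B replaces A's dict of hash-set unions and its dict-items argmax loop by one pass
-- that counts distinct shapes per component by sort-then-scan (objective: alternative).
-- Equality of RETURN values is proved on Pre_ (the inputs where the Python A does not raise).

-- lines[li]["shapes"] — shared subexpression of both Pythons (total form, used under Pre_)
def pvLineShapes (lines : List (List (String × List String))) (li : Int) : List String :=
  PySem.Dict.getD ⟨PySem.List.pyGetD lines li []⟩ "shapes" []

-- ===== PORT A =====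
def get_component_shapes (lines : List (List (String × List String))) (components : List (List Int)) : PySem.Dict Int (PySem.Set String) :=
  (PySem.List.enumerate components 0).foldl
    (fun d p =>
      d.insert p.1 (p.2.foldl (fun cs li => PySem.Set.update cs (pvLineShapes lines li)) PySem.Set.empty))
    PySem.Dict.empty

def get_largest_component (lines : List (List (String × List String))) (components : List (List Int)) : Option (List Int) :=
  let component_shape_sets := get_component_shapes lines components
  let r := component_shape_sets.items.foldl
    (fun (acc : Option Int × Int) p =>
      if PySem.Set.len p.2 > acc.2 then (some p.1, PySem.Set.len p.2) else acc)
    (none, -1)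
  match r.1 with
  | some i => PySem.List.pyGet? components i
  | none => none

-- ===== PORT B =====
def get_largest_component_alt (lines : List (List (String × List String))) (components : List (List Int)) : Option (List Int) :=
  (components.foldl
    (fun (acc : Option (List Int) × Int) comp =>
      let shapes := PySem.List.sorted (comp.flatMap (fun li => pvLineShapes lines li)) (fun s => s) false
      let n := (shapes.foldl
        (fun (q : Int × Option String) s => (if some s ≠ q.2 then q.1 + 1 else q.1, some s))
        (0, none)).1
      if n > acc.2 then (some comp, n) else acc)
    (none, -1)).1

-- ===== PRECONDITION & SPEC =====
-- Pre_ excludes exactly the inputs on which the Python A raises: a component containing a line index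
-- out of range (IndexError) or a referenced line without a "shapes" key (KeyError).
def Pre_get_largest_component (lines : List (List (String × List String))) (components : List (List Int)) : Prop :=
  ∀ c ∈ components, ∀ li ∈ c,
    PySem.Raise.InRange lines.length li ∧
    (PySem.Dict.mk (PySem.List.pyGetD lines li [])).contains "shapes" = true
instance (lines : List (List (String × List String))) (components : List (List Int)) : Decidable (Pre_get_largest_component lines components) := by unfold Pre_get_largest_component; infer_instance

def pvWitness_get_largest_component : (List (List (String × List String))) × List (List Int) :=
  ([[("shapes", ["star"])], [("shapes", ["moon", "star"])]], [[0], [0, 1]])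

def Spec_get_largest_component (lines : List (List (String × List String))) (components : List (List Int)) (out : Option (List Int)) : Prop := out = get_largest_component_alt lines components
instance (lines : List (List (String × List String))) (components : List (List Int)) (out : Option (List Int)) : Decidable (Spec_get_largest_component lines components out) := by unfold Spec_get_largest_component; infer_instance

-- ===== CLAIM (what is proved, stated in full; the proofs are below) =====
def Claim_equal_get_largest_component : Prop := ∀ (lines : List (List (String × List String))) (components : List (List Int)), Dom_get_largest_component lines components → Pre_get_largest_component lines components → Spec_get_largest_component lines components (get_largest_component lines components)

-- ===== LEMMAS AND PROOFS =====

-- the common key: number of distinct shapes of a component (proof-side name)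
def pvShapeCount (lines : List (List (String × List String))) (comp : List Int) : Int :=
  ((comp.flatMap (fun li => pvLineShapes lines li)).toFinset.card : Int)

-- ---- B's inner scan counts run boundaries = #distinct on a sorted list ----

-- recursion-friendly form of B's inner fold
def pvAdj (p : Option String) : List String → Int
  | [] => 0
  | x :: t => (if some x ≠ p then 1 else 0) + pvAdj (some x) t

theorem pv_fold_eq_adj : ∀ (xs : List String) (n : Int) (p : Option String),
    (xs.foldl (fun (q : Int × Option String) s => (if some s ≠ q.2 then q.1 + 1 else q.1, some s)) (n, p)).1
      = n + pvAdj p xs := by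
  intro xs
  induction xs with
  | nil => intro n p; simp [pvAdj]
  | cons x t ih =>
      intro n p
      simp only [List.foldl_cons, pvAdj]
      rw [ih]
      split_ifs <;> ring

theorem pv_adj_some (xs : List String) (hs : xs.Pairwise (· ≤ ·)) :
    ∀ p, (∀ y ∈ xs, p ≤ y) → pvAdj (some p) xs = ((xs.toFinset.erase p).card : Int) := by
  induction xs with
  | nil => intro p _; simp [pvAdj]
  | cons x t ih =>
      intro p hle
      have hpx : p ≤ x := hle x (by simp)
      have hxt : ∀ y ∈ t, x ≤ y := fun y hy => (List.pairwise_cons.1 hs).1 y hy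
      have hst : t.Pairwise (· ≤ ·) := (List.pairwise_cons.1 hs).2
      by_cases hxp : x = p
      · subst hxp
        have : pvAdj (some x) t = ((t.toFinset.erase x).card : Int) := ih hst x hxt
        simp [pvAdj, this, Finset.erase_insert_eq_erase]
      · have hpt : p ∉ t.toFinset := by
          intro hmem
          rcases List.mem_toFinset.1 hmem with hmem'
          exact hxp (le_antisymm (hxt p hmem') hpx)
        have hcard : ((x :: t).toFinset.erase p).card = (t.toFinset.erase x).card + 1 := by
          have hne : ((x :: t).toFinset.erase p) = insert x t.toFinset := by
            rw [List.toFinset_cons, Finset.erase_eq_of_notMem]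
            simp only [Finset.mem_insert]
            rintro (h | h)
            · exact hxp h.symm
            · exact hpt h
          rw [hne]
          by_cases hx : x ∈ t.toFinset
          · rw [Finset.insert_eq_self.2 hx, ← Finset.card_erase_add_one hx]
          · rw [Finset.card_insert_of_notMem hx, Finset.erase_eq_of_notMem hx]
        rw [pvAdj, if_pos (by simpa using hxp), ih hst x hxt, hcard]
        push_cast; ring
  
theorem pv_adj_none (xs : List String) (hs : xs.Pairwise (· ≤ ·)) :
    pvAdj none xs = (xs.toFinset.card : Int) := by
  cases xs with
  | nil => simp [pvAdj]
  | cons x t =>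
      have hxt : ∀ y ∈ t, x ≤ y := fun y hy => (List.pairwise_cons.1 hs).1 y hy
      have hst : t.Pairwise (· ≤ ·) := (List.pairwise_cons.1 hs).2
      rw [pvAdj, if_pos (by simp), pv_adj_some t hst x hxt]
      have : ((x :: t).toFinset.card) = (t.toFinset.erase x).card + 1 := by
        rw [List.toFinset_cons]
        by_cases hx : x ∈ t.toFinset
        · rw [Finset.insert_eq_self.2 hx, ← Finset.card_erase_add_one hx]
        · rw [Finset.card_insert_of_notMem hx, Finset.erase_eq_of_notMem hx]
      rw [this]; push_cast; ring

-- B's inner sort-then-scan computes pvShapeCount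
theorem pv_inner_count (lines : List (List (String × List String))) (comp : List Int) :
    ((PySem.List.sorted (comp.flatMap (fun li => pvLineShapes lines li)) (fun s => s) false).foldl
        (fun (q : Int × Option String) s => (if some s ≠ q.2 then q.1 + 1 else q.1, some s)) (0, none)).1
      = pvShapeCount lines comp := by
  set l := comp.flatMap (fun li => pvLineShapes lines li) with hl
  have hperm : (PySem.List.sorted l (fun s => s) false).Perm l := PySem.List.sorted_perm l _ _
  have hpw : (PySem.List.sorted l (fun s => s) false).Pairwise (· ≤ ·) :=
    PySem.List.sorted_pairwise l _
  rw [pv_fold_eq_adj, pv_adj_none _ hpw, zero_add, pvShapeCount]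
  congr 2
  exact List.toFinset_eq_of_perm _ _ hperm

-- A's per-component hash-set union has pvShapeCount elements
theorem pv_update_flatMap {α β : Type} [BEq α] (f : β → List α) :
    ∀ (c : List β) (s : PySem.Set α),
      c.foldl (fun cs li => PySem.Set.update cs (f li)) s = PySem.Set.update s (c.flatMap f) := by
  intro c
  induction c with
  | nil => intro s; simp [PySem.Set.update]
  | cons x t ih =>
      intro s
      rw [List.flatMap_cons, PySem.Set.update_append]
      simpa using ih (PySem.Set.update s (f x))

theorem pv_A_count (lines : List (List (String × List String))) (c : List Int) :
    PySem.Set.len (c.foldl (fun cs li => PySem.Set.update cs (pvLineShapes lines li)) PySem.Set.empty)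
      = pvShapeCount lines c := by
  rw [pv_update_flatMap]
  rw [show PySem.Set.update PySem.Set.empty (c.flatMap (fun li => pvLineShapes lines li))
        = PySem.Set.ofList (c.flatMap (fun li => pvLineShapes lines li)) from PySem.Set.update_nil_left _]
  set l := c.flatMap (fun li => pvLineShapes lines li) with hl
  have h1 : PySem.Set.ofList l = PySem.List.dedup l := (PySem.List.dedup_eq_ofList l).symm
  have hnd : (PySem.List.dedup l).Nodup := PySem.List.nodup_dedup l
  have hmem : ∀ x, x ∈ PySem.List.dedup l ↔ x ∈ l := fun x => PySem.List.mem_dedup l x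
  have hfs : (PySem.List.dedup l).toFinset = l.toFinset := by
    apply Finset.ext; intro a
    simp only [List.mem_toFinset]
    exact hmem a

  have hlen : (PySem.List.dedup l).length = l.toFinset.card := by
    rw [← hfs, List.toFinset_card_of_nodup hnd]
  simp only [PySem.Set.len, pvShapeCount]
  rw [← hl, h1, hlen]

-- ---- selection loops: both equal Python max(components, key=pvShapeCount) ----

-- an "if-choice" fold stays among its inputs
theorem pv_fold_choice_mem {α : Type} (k : α → Int) :
    ∀ (l : List (Int × α)) (S : List (Int × α)) (q : Int × α), q ∈ S → (∀ p ∈ l, p ∈ S) →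
      l.foldl (fun q p => if k q.2 < k p.2 then p else q) q ∈ S := by
  intro l
  induction l with
  | nil => intro S q hq _; simpa using hq
  | cons x t ih =>
      intro S q hq hl
      simp only [List.foldl_cons]
      split_ifs
      · exact ih S x (hl x (by simp)) (fun p hp => hl p (by simp [hp]))
      · exact ih S q hq (fun p hp => hl p (by simp [hp]))

-- second component of the indexed argmax fold = the plain max fold
theorem pv_fold_snd {α : Type} (k : α → Int) :
    ∀ (t : List α) (s j : Int) (m : α),
      ((PySem.List.enumerate t s).foldl (fun q p => if k q.2 < k p.2 then p else q) (j, m)).2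
        = t.foldl (fun m x => if k m < k x then x else m) m := by
  intro t
  induction t with
  | nil => intro s j m; simp [PySem.List.enumerate_nil]
  | cons x t ih =>
      intro s j m
      rw [PySem.List.enumerate_cons]
      simp only [List.foldl_cons]
      split_ifs <;> exact ih _ _ _

-- A's loop state (some index, current max) tracks the indexed argmax fold
theorem pv_foldA {α : Type} (k : α → Int) :
    ∀ (t : List α) (s j : Int) (m : α),
      (PySem.List.enumerate t s).foldl
          (fun (acc : Option Int × Int) p => if k p.2 > acc.2 then (some p.1, k p.2) else acc)
          (some j, k m)
        = (fun (r : Int × α) => (some r.1, k r.2))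
            ((PySem.List.enumerate t s).foldl (fun q p => if k q.2 < k p.2 then p else q) (j, m)) := by
  intro t
  induction t with
  | nil => intro s j m; simp [PySem.List.enumerate_nil]
  | cons x t ih =>
      intro s j m
      rw [PySem.List.enumerate_cons]
      simp only [List.foldl_cons, gt_iff_lt]
      split_ifs <;> exact ih _ _ _

-- folding max?'s step from a some-state is the plain max fold
theorem pv_fold_some {α : Type} (k : α → Int) :
    ∀ (t : List α) (m : α),
      t.foldl
          (fun (acc : Option α) x =>
            match acc with
            | none => some x
            | some m => if k m < k x then some x else some m)
          (some m)
        = some (t.foldl (fun m x => if k m < k x then x else m) m) := by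
  intro t
  induction t with
  | nil => intro m; simp
  | cons x t ih =>
      intro m
      simp only [List.foldl_cons]
      rw [show (if k m < k x then some x else some m) = some (if k m < k x then x else m) from (apply_ite some _ _ _).symm]
      exact ih _

-- A bridge: A's dict-items argmax loop + final indexing = Python max with key
theorem pv_mainA {α : Type} (k : α → Int) (hk : ∀ c, 0 ≤ k c) (comps : List α) :
    (match ((PySem.List.enumerate comps 0).foldl
        (fun (acc : Option Int × Int) p => if k p.2 > acc.2 then (some p.1, k p.2) else acc)
        ((none : Option Int), (-1 : Int))).1 with
     | some i => PySem.List.pyGet? comps i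
     | none => none)
      = PySem.List.max? comps k := by
  cases comps with
  | nil => simp [PySem.List.enumerate_nil, PySem.List.max?]
  | cons c0 t =>
      rw [PySem.List.enumerate_cons]
      simp only [List.foldl_cons]
      rw [if_pos (by have := hk c0; omega : ((-1 : Int) < k c0))]
      simp only [zero_add]
      rw [pv_foldA k t 1 0 c0]
      have hmem : (PySem.List.enumerate t 1).foldl (fun q p => if k q.2 < k p.2 then p else q) (0, c0)
          ∈ PySem.List.enumerate (c0 :: t) 0 := by
        apply pv_fold_choice_mem k (PySem.List.enumerate t 1) (PySem.List.enumerate (c0 :: t) 0)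
        · rw [PySem.List.enumerate_cons]; simp
        · intro p hp; rw [PySem.List.enumerate_cons]; simp [hp]
      rcases (PySem.List.mem_enumerate_iff _ _ _).1 hmem with ⟨kk, hkk, hpair⟩
      simp only [hpair, zero_add]
      have hget : PySem.List.pyGet? (c0 :: t) (kk : Int) = some ((c0 :: t)[kk]) := by
        rw [PySem.List.pyGet?_natCast]
        simp [List.getElem?_eq_getElem hkk]
      simp only [hget]
      have hsnd := pv_fold_snd k t 1 0 c0
      rw [hpair] at hsnd
      simp only at hsnd
      rw [show ((c0 :: t)[kk] : α) = ((kk : Int), (c0 :: t)[kk]).2 from rfl, hsnd]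
      rw [PySem.List.max?]
      simp only [List.foldl_cons]
      exact (pv_fold_some k t c0).symm

-- B's running-best fold from a some-state tracks the plain max fold
theorem pv_foldB_some {α : Type} (k : α → Int) :
    ∀ (t : List α) (m : α),
      t.foldl (fun (acc : Option α × Int) c => if k c > acc.2 then (some c, k c) else acc) (some m, k m)
        = (fun r => ((some r : Option α), k r)) (t.foldl (fun m x => if k m < k x then x else m) m) := by
  intro t
  induction t with
  | nil => intro m; simp
  | cons x t ih =>
      intro m
      simp only [List.foldl_cons, gt_iff_lt]
      split_ifs <;> exact ih _

-- B bridge: B's single selection pass = Python max with key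
theorem pv_mainB {α : Type} (k : α → Int) (hk : ∀ c, 0 ≤ k c) (comps : List α) :
    (comps.foldl (fun (acc : Option α × Int) c => if k c > acc.2 then (some c, k c) else acc)
        ((none : Option α), (-1 : Int))).1
      = PySem.List.max? comps k := by
  cases comps with
  | nil => simp [PySem.List.max?]
  | cons c0 t =>
      simp only [List.foldl_cons, gt_iff_lt]
      rw [if_pos (by have := hk c0; omega : ((-1 : Int) < k c0))]
      rw [pv_foldB_some k t c0]
      rw [PySem.List.max?]
      simp only [List.foldl_cons]
      exact (pv_fold_some k t c0).symm

-- ===== VERDICT (by name: the statement is the Claim_ definition above) =====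
theorem get_largest_component_spec : Claim_equal_get_largest_component := by
  intro lines components _hdom _hpre
  have hk : ∀ c : List Int, 0 ≤ pvShapeCount lines c := by
    intro c; simp [pvShapeCount]
  -- B side: rewrite the inner scan to the common key, then apply the B bridge
  have hB : get_largest_component_alt lines components
      = PySem.List.max? components (fun c => pvShapeCount lines c) := by
    unfold get_largest_component_alt
    have hstep : (fun (acc : Option (List Int) × Int) comp =>
        let shapes := PySem.List.sorted (comp.flatMap (fun li => pvLineShapes lines li)) (fun s => s) false
        let n := (shapes.foldl
          (fun (q : Int × Option String) s => (if some s ≠ q.2 then q.1 + 1 else q.1, some s))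
          (0, none)).1
        if n > acc.2 then (some comp, n) else acc)
        = (fun (acc : Option (List Int) × Int) c =>
            if pvShapeCount lines c > acc.2 then (some c, pvShapeCount lines c) else acc) := by
      funext acc comp
      simp only [pv_inner_count]
    rw [hstep]
    exact pv_mainB (fun c => pvShapeCount lines c) hk components
  -- A side: dict items, per-component set sizes, then the A bridge
  unfold Spec_get_largest_component get_largest_component get_component_shapes
  rw [hB]
  have hitems :
      ((PySem.List.enumerate components 0).foldl
        (fun (d : PySem.Dict Int (PySem.Set String)) p =>
          d.insert p.1 (p.2.foldl (fun cs li => PySem.Set.update cs (pvLineShapes lines li)) PySem.Set.empty))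
        PySem.Dict.empty).items
      = (PySem.List.enumerate components 0).map
          (fun p => (p.1, p.2.foldl (fun cs li => PySem.Set.update cs (pvLineShapes lines li)) PySem.Set.empty)) := by
    rw [PySem.Dict.items_foldl_insert_fresh]
    · simp [show (PySem.Dict.empty : PySem.Dict Int (PySem.Set String)).items = [] from rfl]
    · intro a _; exact PySem.Dict.contains_empty _
    · rw [PySem.List.map_fst_enumerate]
      exact PySem.List.nodup_pyRange_one _ _
  simp only [hitems, List.foldl_map]
  have hkey : ∀ (p : Int × List Int),
      PySem.Set.len (p.2.foldl (fun cs li => PySem.Set.update cs (pvLineShapes lines li)) PySem.Set.empty)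
        = pvShapeCount lines p.2 := fun p => pv_A_count lines p.2
  simp only [hkey]
  exact pv_mainA (fun c => pvShapeCount lines c) hk components
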